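-- pv_equiv track=rewrite | github.com/ASSERT-KTH/Mokav | experiments/pynguin/c4b/return-lst/generated_tests/src_263/7/src_263.py | func
-- ===== SOURCE A (Python) =====
-- def func(*args):
-- 	ret_values = []
--
-- 	(last, res) = ((- 1), 0)
-- 	s = args[0]
-- 	for (i, c) in enumerate(s):
-- 	    if (c in 'AEIOUY'):
-- 	        res = max(res, (i - last))
-- 	        last = i
-- 	res = max(res, (len(s) - last))
-- 	ret_values.append(res)
--
-- 	return ret_values
-- ===== SOURCE B (Python) =====
-- def func(*args):
--     s = args[0]
--     positions = [-1] + [i for i, c in enumerate(s) if c in 'AEIOUY'] + [len(s)]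
--     return [max(b - a for a, b in zip(positions, positions[1:]))]
-- ===== Notes on version B (the rewrite author's own statement) =====
-- stated objective: alternative
-- what changed: A's single running-state pass (tracking last vowel position and a running max) is replaced by materializing the sentinel-bracketed list of vowel positions [-1]+idx+[len(s)] and taking the max of consecutive differences.
import Mathlib
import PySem

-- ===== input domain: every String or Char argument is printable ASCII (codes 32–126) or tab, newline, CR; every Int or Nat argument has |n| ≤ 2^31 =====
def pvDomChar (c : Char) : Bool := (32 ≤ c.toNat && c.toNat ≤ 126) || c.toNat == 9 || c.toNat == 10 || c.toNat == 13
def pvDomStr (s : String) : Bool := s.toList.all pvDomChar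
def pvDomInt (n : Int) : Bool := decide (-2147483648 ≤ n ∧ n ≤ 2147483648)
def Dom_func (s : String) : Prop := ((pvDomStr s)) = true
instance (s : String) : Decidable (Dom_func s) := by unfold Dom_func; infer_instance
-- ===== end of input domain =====

-- ===== PORT A =====
-- B replaces A's running (last, res) state pass by a materialized sentinel-bracketed
-- vowel-position list followed by a max over consecutive differences (alternative decomposition).
def func (s : String) : List Int :=
  -- (last, res) = (-1, 0); for (i, c) in enumerate(s): if c in 'AEIOUY': res = max(res, i-last); last = i
  let st := (PySem.List.enumerate s.toList 0).foldl
    (fun (st : Int × Int) (ic : Int × Char) =>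
      if ic.2 ∈ "AEIOUY".toList then (ic.1, max st.2 (ic.1 - st.1)) else st)
    (-1, 0)
  -- res = max(res, len(s) - last); return [res]
  [max st.2 ((s.toList.length : Int) - st.1)]

-- ===== PORT B =====
def func_alt (s : String) : List Int :=
  let positions : List Int :=
    -1 :: ((PySem.List.enumerate s.toList 0).filterMap
             (fun ic => if ic.2 ∈ "AEIOUY".toList then some ic.1 else none))
          ++ [((s.toList.length : Int))]
  let diffs := (positions.zip positions.tail).map (fun p => p.2 - p.1)
  match diffs with
  | [] => []          -- unreachable: positions always has ≥ 2 elements (Python's max would raise on empty)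
  | d :: ds => [ds.foldl max d]

-- ===== PRECONDITION & SPEC =====
def Spec_func (s : String) (out : List Int) : Prop := out = func_alt s
instance (s : String) (out : List Int) : Decidable (Spec_func s out) := by unfold Spec_func; infer_instance

-- ===== CLAIM (what is proved, stated in full; the proofs are below) =====
def Claim_equal_func : Prop := ∀ (s : String), Dom_func s → Spec_func s (func s)

-- ===== LEMMAS AND PROOFS =====

def pvStep : Int × Int → Int × Char → Int × Int :=
  fun st ic => if ic.2 ∈ "AEIOUY".toList then (ic.1, max st.2 (ic.1 - st.1)) else st

def pvIdx (cs : List Char) (k : Int) : List Int :=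
  (PySem.List.enumerate cs k).filterMap
    (fun ic => if ic.2 ∈ "AEIOUY".toList then some ic.1 else none)

def pvDiffs : List Int → List Int :=
  fun l => (l.zip l.tail).map (fun p => p.2 - p.1)

theorem pvDiffs_cons (a b : Int) (t : List Int) :
    pvDiffs (a :: b :: t) = (b - a) :: pvDiffs (b :: t) := rfl

theorem pvIdx_nil (k : Int) : pvIdx [] k = [] := by
  simp [pvIdx, PySem.List.enumerate_nil]

theorem pvIdx_cons (c : Char) (cs : List Char) (k : Int) :
    pvIdx (c :: cs) k =
      if c ∈ "AEIOUY".toList then k :: pvIdx cs (k + 1) else pvIdx cs (k + 1) := by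
  simp only [pvIdx, PySem.List.enumerate_cons, List.filterMap_cons]
  by_cases h : c ∈ "AEIOUY".toList
  · rw [if_pos h, if_pos h]
  · rw [if_neg h, if_neg h]

-- main loop invariant: A's final value equals the fold of max over res and the
-- consecutive differences of (last :: vowel indices from k :: [n])
theorem pv_main (cs : List Char) (k last res n : Int) :
    (let st := (PySem.List.enumerate cs k).foldl pvStep (last, res)
     max st.2 (n - st.1))
    = (pvDiffs (last :: (pvIdx cs k ++ [n]))).foldl max res := by
  induction cs generalizing k last res with
  | nil =>
    simp [PySem.List.enumerate_nil, pvIdx_nil, pvDiffs]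
  | cons c cs ih =>
    simp only [PySem.List.enumerate_cons, List.foldl_cons, pvIdx_cons]
    by_cases h : c ∈ "AEIOUY".toList
    · rw [if_pos h, show pvStep (last, res) (k, c) = (k, max res (k - last)) from if_pos h,
        List.cons_append, pvDiffs_cons, List.foldl_cons]
      exact ih (k + 1) k (max res (k - last))
    · rw [if_neg h, show pvStep (last, res) (k, c) = (last, res) from if_neg h]
      exact ih (k + 1) last res

theorem pv_foldl_max_nonneg (d : Int) (ds : List Int) (h : 0 ≤ d) :
    (d :: ds).foldl max 0 = ds.foldl max d := by
  simp [List.foldl_cons, max_eq_right h]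

-- pvDiffs of the sentinel-bracketed list is nonempty and its head is ≥ 0
theorem pv_head_diffs (idx : List Int) (n : Int) (hn : 0 ≤ n)
    (hidx : ∀ i ∈ idx, 0 ≤ i) :
    ∃ d ds, pvDiffs (-1 :: (idx ++ [n])) = d :: ds ∧ 0 ≤ d := by
  cases idx with
  | nil => exact ⟨n - (-1), [], rfl, by omega⟩
  | cons i t =>
    refine ⟨i - (-1), pvDiffs (i :: (t ++ [n])), by rw [List.cons_append, pvDiffs_cons], ?_⟩
    have := hidx i (by simp)
    omega

theorem pvIdx_nonneg (cs : List Char) (k : Int) (hk : 0 ≤ k) :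
    ∀ i ∈ pvIdx cs k, 0 ≤ i := by
  induction cs generalizing k with
  | nil => simp [pvIdx_nil]
  | cons c cs ih =>
    intro i hi
    rw [pvIdx_cons] at hi
    by_cases h : c ∈ "AEIOUY".toList
    · rw [if_pos h] at hi
      rcases List.mem_cons.mp hi with hi | hi
      · omega
      · exact ih (k + 1) (by omega) i hi
    · rw [if_neg h] at hi
      exact ih (k + 1) (by omega) i hi

-- ===== VERDICT (by name: the statement is the Claim_ definition above) =====
theorem func_spec : Claim_equal_func := by
  intro s _
  unfold Spec_func func func_alt
  have hmain := pv_main s.toList 0 (-1) 0 (s.toList.length : Int)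
  obtain ⟨d, ds, hds, hd⟩ :=
    pv_head_diffs (pvIdx s.toList 0) (s.toList.length : Int) (by positivity)
      (pvIdx_nonneg s.toList 0 le_rfl)
  show [max ((PySem.List.enumerate s.toList 0).foldl pvStep (-1, 0)).2
          ((s.toList.length : Int) - ((PySem.List.enumerate s.toList 0).foldl pvStep (-1, 0)).1)]
      = (match pvDiffs (-1 :: (pvIdx s.toList 0 ++ [(s.toList.length : Int)])) with
         | [] => []
         | d :: ds => [ds.foldl max d])
  rw [hds, show (max ((PySem.List.enumerate s.toList 0).foldl pvStep (-1, 0)).2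
          ((s.toList.length : Int) - ((PySem.List.enumerate s.toList 0).foldl pvStep (-1, 0)).1))
        = (pvDiffs (-1 :: (pvIdx s.toList 0 ++ [(s.toList.length : Int)]))).foldl max 0 from hmain,
      hds, pv_foldl_max_nonneg d ds hd]
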